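-- pv_equiv track=rewrite | github.com/ShapeLayer/training | tasks/online_judge/baekjoon/python/10205.py | compute
-- ===== SOURCE A (Python) =====
-- def compute(heads: int, opers: str) -> int:
--     for oper in opers:
--             if oper == 'c':
--                 heads += 1
--             else:
--                 heads -= 1
--
--             if heads == 0:
--                 return heads
--     return heads
-- ===== SOURCE B (Python) =====
-- def compute(heads: int, opers: str) -> int:
--     # Build the prefix displacements once, then decide by membership + closed form.
--     prefixes = []
--     s = 0
--     for o in opers:
--         s += 1 if o == 'c' else -1
--         prefixes.append(s)
--     if -heads in prefixes:
--         return 0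
--     return heads + s
-- ===== Notes on version B (the rewrite author's own statement) =====
-- stated objective: alternative
-- what changed: Replaced the interleaved early-exit simulation with a two-phase decomposition: compute the list of prefix displacements of the +1/-1 deltas, then return 0 if -heads occurs among them, else the closed-form value heads plus the total displacement.
import Mathlib
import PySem

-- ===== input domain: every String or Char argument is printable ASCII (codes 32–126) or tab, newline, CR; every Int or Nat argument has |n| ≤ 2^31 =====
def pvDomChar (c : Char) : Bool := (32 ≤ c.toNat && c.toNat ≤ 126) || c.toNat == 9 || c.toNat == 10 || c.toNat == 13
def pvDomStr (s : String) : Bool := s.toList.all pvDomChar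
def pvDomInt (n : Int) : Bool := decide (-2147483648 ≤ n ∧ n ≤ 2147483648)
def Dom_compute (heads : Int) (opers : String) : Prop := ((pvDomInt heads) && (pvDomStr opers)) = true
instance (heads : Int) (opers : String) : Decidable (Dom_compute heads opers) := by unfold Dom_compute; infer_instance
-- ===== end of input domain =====

-- B replaces A's interleaved early-exit simulation by "build prefix displacements,
-- then membership test plus closed-form arithmetic" (objective: alternative, same cost).

-- ===== PORT A =====
-- literal port of A's loop with early return at zero
def computeAux (heads : Int) : List Char → Int
  | [] => heads
  | oper :: rest =>
    let heads' := if oper = 'c' then heads + 1 else heads - 1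
    if heads' = 0 then heads' else computeAux heads' rest

def compute (heads : Int) (opers : String) : Int :=
  computeAux heads opers.toList

-- ===== PORT B =====
-- literal port of Source B: one loop building (prefixes, s), then membership + closed form
def compute_alt (heads : Int) (opers : String) : Int :=
  let p := opers.toList.foldl
    (fun (acc : List Int × Int) o =>
      let s := acc.2 + (if o = 'c' then 1 else -1)
      (acc.1 ++ [s], s)) ([], 0)
  if (-heads) ∈ p.1 then 0 else heads + p.2

-- ===== PRECONDITION & SPEC =====
def Spec_compute (heads : Int) (opers : String) (out : Int) : Prop := out = compute_alt heads opers
instance (heads : Int) (opers : String) (out : Int) : Decidable (Spec_compute heads opers out) := by unfold Spec_compute; infer_instance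

-- ===== CLAIM (what is proved, stated in full; the proofs are below) =====
def Claim_equal_compute : Prop := ∀ (heads : Int) (opers : String), Dom_compute heads opers → Spec_compute heads opers (compute heads opers)

-- ===== LEMMAS AND PROOFS =====

def pvDelta (c : Char) : Int := if c = 'c' then 1 else -1

-- prefix displacement list starting from running sum s
def pvPref (s : Int) : List Char → List Int
  | [] => []
  | c :: rest => (s + pvDelta c) :: pvPref (s + pvDelta c) rest

def pvSum (l : List Char) : Int := (l.map pvDelta).sum

theorem pvPref_shift (l : List Char) : ∀ (t s : Int),
    pvPref (t + s) l = (pvPref s l).map (t + ·) := by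
  induction l with
  | nil => intro t s; simp [pvPref]
  | cons c rest ih =>
    intro t s
    simp only [pvPref, List.map_cons, add_assoc]
    exact congrArg _ (ih t (s + pvDelta c))

theorem pvFoldl_char (l : List Char) : ∀ (acc : List Int) (s : Int),
    l.foldl (fun (acc : List Int × Int) o =>
      let s := acc.2 + (if o = 'c' then 1 else -1)
      (acc.1 ++ [s], s)) (acc, s)
    = (acc ++ pvPref s l, s + pvSum l) := by
  induction l with
  | nil => intro acc s; simp [pvPref, pvSum]
  | cons c rest ih =>
    intro acc s
    simp only [List.foldl_cons]
    rw [ih]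
    simp [pvPref, pvSum, pvDelta, add_assoc]

theorem computeAux_char (l : List Char) : ∀ (heads : Int),
    computeAux heads l = if (-heads) ∈ pvPref 0 l then 0 else heads + pvSum l := by
  induction l with
  | nil => intro heads; simp [computeAux, pvPref, pvSum]
  | cons c rest ih =>
    intro heads
    have hstep : (if c = 'c' then heads + 1 else heads - 1) = heads + pvDelta c := by
      unfold pvDelta; split_ifs <;> ring
    simp only [computeAux, hstep]
    rw [ih]
    have hmem : (-heads) ∈ pvPref (pvDelta c) rest ↔ (-(heads + pvDelta c)) ∈ pvPref 0 rest := by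
      have := pvPref_shift rest (pvDelta c) 0
      simp only [add_zero] at this
      rw [this, List.mem_map]
      constructor
      · rintro ⟨x, hx, he⟩
        have : x = -(heads + pvDelta c) := by omega
        rwa [this] at hx
      · intro hx
        exact ⟨-(heads + pvDelta c), hx, by ring⟩
    by_cases hz : heads + pvDelta c = 0
    · have : (-heads) ∈ pvPref 0 (c :: rest) := by
        simp [pvPref]; left; omega
      simp [hz, this]
    · have hne : ¬ (-heads = 0 + pvDelta c) := by omega
      simp only [pvPref, List.mem_cons, zero_add] at *
      rw [if_neg hz]
      by_cases hm : (-(heads + pvDelta c)) ∈ pvPref 0 rest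
      · rw [if_pos hm, if_pos (Or.inr (hmem.mpr hm))]
      · have h1 : ¬ ((-heads) = pvDelta c ∨ (-heads) ∈ pvPref (pvDelta c) rest) := by
          rintro (h | h)
          · omega
          · exact hm (hmem.mp h)
        rw [if_neg hm, if_neg h1]
        simp [pvSum, pvDelta]
        split_ifs <;> ring

-- ===== VERDICT (by name: the statement is the Claim_ definition above) =====
theorem compute_spec : Claim_equal_compute := by
  intro heads opers _
  unfold Spec_compute compute compute_alt
  rw [pvFoldl_char]
  simp only [List.nil_append, zero_add]
  exact computeAux_char opers.toList heads
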